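-- pv_equiv track=rewrite | github.com/MarshalZhang/2017A2CS | Ch24/Recurrsion.py | countHi2
-- ===== SOURCE A (Python) =====
-- def countHi2(n):
--     if len(n)<2:
--         return 0
--     if len(n)==2 and n[-1]=='i' and n[-2]=='h':
--         return 1
--     if n[-1]=='i' and n[-2]=='h' and n[-3]!='x':
--         return 1+countHi2(n[:-1])
--     else:
--         return countHi2(n[:-1])
-- ===== SOURCE B (Python) =====
-- def countHi2(n):
--     count = 0
--     prev2 = None  # char two positions back
--     prev1 = None  # previous char
--     for ch in n:
--         if prev1 == 'h' and ch == 'i' and prev2 != 'x':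
--             count += 1
--         prev2, prev1 = prev1, ch
--     return count
-- ===== Notes on version B (the rewrite author's own statement) =====
-- stated objective: faster
-- what changed: Replaced the O(n^2) tail-slicing recursion with a single forward pass that keeps the previous two characters in rolling variables.
import Mathlib
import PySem

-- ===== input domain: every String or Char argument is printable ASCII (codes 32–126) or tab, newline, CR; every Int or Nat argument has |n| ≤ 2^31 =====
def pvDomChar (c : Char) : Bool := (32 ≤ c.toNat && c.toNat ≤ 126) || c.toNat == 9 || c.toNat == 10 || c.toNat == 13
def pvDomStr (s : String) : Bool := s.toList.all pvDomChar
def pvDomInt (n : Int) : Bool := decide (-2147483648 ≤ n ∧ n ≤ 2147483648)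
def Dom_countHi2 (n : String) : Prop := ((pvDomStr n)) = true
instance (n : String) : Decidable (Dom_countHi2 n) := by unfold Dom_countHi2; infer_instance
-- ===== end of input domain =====

-- B replaces A's O(n^2) tail-slicing recursion by a single forward pass with two rolling previous-char variables (objective: faster).

-- ===== PORT A =====
-- A's recursion, on the string's character list (string indexing/slicing is PySem's, defined over List Char)
def countHi2A (l : List Char) : Int :=
  if _h : l.length < 2 then 0
  else if l.length = 2 ∧ PySem.List.pyGet? l (-1) = some 'i' ∧ PySem.List.pyGet? l (-2) = some 'h' then 1
  else if PySem.List.pyGet? l (-1) = some 'i' ∧ PySem.List.pyGet? l (-2) = some 'h' ∧ PySem.List.pyGet? l (-3) ≠ some 'x'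
    then 1 + countHi2A (PySem.List.slice l none (some (-1)))
    else countHi2A (PySem.List.slice l none (some (-1)))
termination_by l.length
decreasing_by
  all_goals simp [PySem.List.slice_to_neg_one, List.length_dropLast]; omega

def countHi2 (n : String) : Int := countHi2A n.toList

-- ===== PORT B =====
-- the loop body: state is (prev2, prev1, count)
def countHi2Step (st : Option Char × Option Char × Int) (ch : Char) : Option Char × Option Char × Int :=
  (st.2.1, some ch,
    st.2.2 + if st.2.1 = some 'h' ∧ ch = 'i' ∧ st.1 ≠ some 'x' then 1 else 0)

def countHi2_alt (n : String) : Int :=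
  (n.toList.foldl countHi2Step (none, none, 0)).2.2

-- ===== PRECONDITION & SPEC =====
def Spec_countHi2 (n : String) (out : Int) : Prop := out = countHi2_alt n
instance (n : String) (out : Int) : Decidable (Spec_countHi2 n out) := by unfold Spec_countHi2; infer_instance

-- ===== CLAIM (what is proved, stated in full; the proofs are below) =====
def Claim_equal_countHi2 : Prop := ∀ (n : String), Dom_countHi2 n → Spec_countHi2 n (countHi2 n)

-- ===== LEMMAS AND PROOFS =====

-- state of B's fold: second component is the last char seen
theorem foldF_snd (l : List Char) :
    (l.foldl countHi2Step (none, none, 0)).2.1 = l.getLast? := by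
  induction l using List.reverseRecOn with
  | nil => rfl
  | append_singleton l c _ => simp [List.foldl_append, countHi2Step]

-- first component is the char before the last
theorem foldF_fst (l : List Char) :
    (l.foldl countHi2Step (none, none, 0)).1 = l.dropLast.getLast? := by
  induction l using List.reverseRecOn with
  | nil => rfl
  | append_singleton l c _ => simp [List.foldl_append, countHi2Step, foldF_snd]

theorem pyGet_neg2_append (l : List Char) (c : Char) (hl : l ≠ []) :
    PySem.List.pyGet? (l ++ [c]) (-2) = l.getLast? := by
  have hp : 0 < l.length := List.length_pos_iff.mpr hl
  rw [PySem.List.pyGet?_neg_ofNat (l ++ [c]) 2 (by omega)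
      (by simp only [List.length_append, List.length_cons, List.length_nil]; omega)]
  have h1 : (l ++ [c]).length - 2 = l.length - 1 := by
    simp only [List.length_append, List.length_cons, List.length_nil]; omega
  rw [h1, List.getElem?_append_left (by omega), List.getLast?_eq_getElem?]

theorem pyGet_neg3_append (l : List Char) (c : Char) :
    PySem.List.pyGet? (l ++ [c]) (-3) = l.dropLast.getLast? := by
  by_cases h : 2 ≤ l.length
  · rw [PySem.List.pyGet?_neg_ofNat (l ++ [c]) 3 (by omega)
        (by simp only [List.length_append, List.length_cons, List.length_nil]; omega)]
    have h1 : (l ++ [c]).length - 3 = l.length - 2 := by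
      simp only [List.length_append, List.length_cons, List.length_nil]; omega
    rw [h1, List.getElem?_append_left (by omega), List.getLast?_eq_getElem?,
        List.getElem?_dropLast, List.length_dropLast]
    rw [if_pos (by omega), show l.length - 1 - 1 = l.length - 2 from by omega]
  · -- short list: both sides are none
    have hdl : l.dropLast = [] := by
      cases l with
      | nil => rfl
      | cons a t => cases t with
        | nil => rfl
        | cons b u => exact (h (by simp only [List.length_cons]; omega)).elim
    rw [hdl]
    simp only [List.getLast?_nil]
    simp [PySem.List.pyGet?, PySem.List.pyIdx?]
    omega

theorem countHi2A_eq_fold (l : List Char) :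
    countHi2A l = (l.foldl countHi2Step (none, none, 0)).2.2 := by
  induction l using List.reverseRecOn with
  | nil => simp [countHi2A]
  | append_singleton l c ih =>
    rw [List.foldl_append, List.foldl_cons, List.foldl_nil]
    cases l with
    | nil => simp [countHi2A, countHi2Step]
    | cons a t =>
      have hslice : PySem.List.slice ((a :: t) ++ [c]) none (some (-1)) = a :: t := by
        rw [PySem.List.slice_to_neg_one, List.dropLast_concat]
      rw [countHi2A, dif_neg (by simp),
          PySem.List.pyGet?_neg_one_append_singleton,
          pyGet_neg2_append _ _ (by simp), pyGet_neg3_append, hslice, ih]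
      simp only [countHi2Step]
      rw [foldF_snd, foldF_fst]
      have hlen : (a :: t ++ [c]).length = 2 ↔ t = [] := by
        simp [List.length_append]
      by_cases ht : t = []
      · subst ht
        simp only [hlen, Option.some.injEq]
        split_ifs <;> simp_all [countHi2Step]
      · simp only [hlen, ht, false_and, if_false, Option.some.injEq]
        split_ifs <;> try tauto
        all_goals omega

-- ===== VERDICT (by name: the statement is the Claim_ definition above) =====
theorem countHi2_spec : Claim_equal_countHi2 := by
  intro n _
  unfold Spec_countHi2 countHi2 countHi2_alt
  exact countHi2A_eq_fold n.toList
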